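-- pv_equiv track=rewrite | github.com/on1dds/get-switch-info | get-switch.py | setCR
-- ===== SOURCE A (Python) =====
-- def setCR(s):
--     out2 = ""
--     quoted = False
--     for c in s:
--         if (c == '"'): quoted = not quoted
--         if (quoted and c == '\n'): c = ','
--         if (quoted and c == '\r'): c = ''
--
--         out2 += c
--     return out2
-- ===== SOURCE B (Python) =====
-- def setCR(s):
--     parts = s.split('"')
--     fixed = [p.replace('\n', ',').replace('\r', '') if i % 2 == 1 else p
--              for i, p in enumerate(parts)]
--     return '"'.join(fixed)
-- ===== Notes on version B (the rewrite author's own statement) =====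
-- stated objective: faster
-- what changed: Replaces the character-by-character state machine with quadratic string concatenation by a split-on-quote decomposition: odd-indexed segments of the split are exactly the in-quote regions, fixed with str.replace, and rejoined.
import Mathlib
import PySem

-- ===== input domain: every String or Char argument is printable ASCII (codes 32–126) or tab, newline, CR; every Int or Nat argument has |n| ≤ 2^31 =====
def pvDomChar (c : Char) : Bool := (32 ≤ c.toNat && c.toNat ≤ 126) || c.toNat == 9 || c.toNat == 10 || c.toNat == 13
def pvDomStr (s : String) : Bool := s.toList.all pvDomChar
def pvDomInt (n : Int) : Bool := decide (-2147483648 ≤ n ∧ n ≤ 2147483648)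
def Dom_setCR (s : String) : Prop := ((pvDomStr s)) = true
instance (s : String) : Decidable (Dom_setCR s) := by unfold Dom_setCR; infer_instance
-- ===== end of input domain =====

-- B replaces A's character state machine by split-on-quote / fix odd segments / rejoin (different decomposition).

-- ===== PORT A =====
-- literal transliteration: out2 accumulator, quoted flag; '' for a dropped '\r' is the empty char list
def setCR (s : String) : String :=
  let r := s.toList.foldl (fun (st : List Char × Bool) c =>
    let quoted := if c == '"' then !st.2 else st.2
    let c' : List Char := if quoted && c == '\n' then [','] else
                          if quoted && c == '\r' then [] else [c]
    (st.1 ++ c', quoted)) ([], false)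
  String.mk r.1

-- ===== PORT B =====
def setCR_alt (s : String) : String :=
  let parts := PySem.Chars.splitOn s.toList ['"']
  let fixed := (PySem.List.enumerate parts).map (fun ip =>
    if ip.1 % 2 == 1 then PySem.Chars.replace (PySem.Chars.replace ip.2 ['\n'] [',']) ['\r'] [] else ip.2)
  String.mk (PySem.Chars.join ['"'] fixed)

-- ===== PRECONDITION & SPEC =====
def Spec_setCR (s : String) (out : String) : Prop := out = setCR_alt s
instance (s : String) (out : String) : Decidable (Spec_setCR s out) := by unfold Spec_setCR; infer_instance

-- ===== CLAIM (what is proved, stated in full; the proofs are below) =====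
def Claim_equal_setCR : Prop := ∀ (s : String), Dom_setCR s → Spec_setCR s (setCR s)

-- ===== LEMMAS AND PROOFS =====

/-- A's loop as a pure function: the characters that A emits processing `cs` from flag `q`. -/
def fA (q : Bool) : List Char → List Char
  | [] => []
  | c :: cs =>
    let q' := if c == '"' then !q else q
    (if q' && c == '\n' then [','] else if q' && c == '\r' then [] else [c]) ++ fA q' cs

theorem fA_foldl (cs : List Char) : ∀ (acc : List Char) (q : Bool),
    (cs.foldl (fun (st : List Char × Bool) c =>
      let quoted := if c == '"' then !st.2 else st.2
      let c' : List Char := if quoted && c == '\n' then [','] else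
                            if quoted && c == '\r' then [] else [c]
      (st.1 ++ c', quoted)) (acc, q)).1 = acc ++ fA q cs := by
  induction cs with
  | nil => intro acc q; simp [fA]
  | cons c cs ih => intro acc q; simp only [List.foldl_cons, fA, ih, List.append_assoc]

/-- structural single-quote split -/
def split1 : List Char → List (List Char)
  | [] => [[]]
  | c :: cs => if c = '"' then [] :: split1 cs else (split1 cs).modifyHead (c :: ·)

theorem split1_ne_nil (cs : List Char) : split1 cs ≠ [] := by
  induction cs with
  | nil => simp [split1]
  | cons c cs ih =>
    simp only [split1]; split
    · simp
    · cases h : split1 cs with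
      | nil => exact absurd h ih
      | cons a l => simp [List.modifyHead]

theorem splitOn_go_eq : ∀ (fuel : Nat) (l cur : List Char) (accs : List (List Char)),
    l.length ≤ fuel →
    PySem.Chars.splitOn.go ['"'] fuel l cur accs =
      accs.reverse ++ (split1 l).modifyHead (cur.reverse ++ ·) := by
  intro fuel
  induction fuel with
  | zero =>
    intro l cur accs h
    have hl : l = [] := List.eq_nil_of_length_eq_zero (Nat.le_zero.mp h)
    subst hl
    simp [PySem.Chars.splitOn.go, split1]
  | succ fuel ih =>
    intro l cur accs h
    cases l with
    | nil => simp [PySem.Chars.splitOn.go, split1]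
    | cons c rest =>
      by_cases hc : c = '"'
      · subst hc
        rw [PySem.Chars.splitOn.go]
        simp only [List.isPrefixOf, BEq.rfl, Bool.true_and, if_pos]
        simp only [List.length_cons, List.drop_succ_cons, List.length_nil, List.drop_zero]
        rw [ih rest [] _ (by simpa using h)]
        simp only [split1, List.modifyHead, List.reverse_cons, List.reverse_nil,
          List.nil_append, List.append_assoc, List.singleton_append]
        cases split1 rest <;> simp
      · rw [PySem.Chars.splitOn.go]
        have hpre : (['"'] : List Char).isPrefixOf (c :: rest) = false := by
          simp [List.isPrefixOf]
          exact fun e => hc e.symm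
        rw [hpre]
        simp only [Bool.false_eq_true, if_false]
        rw [ih rest (c :: cur) accs (by simpa using h)]
        simp only [split1, if_neg hc]
        cases hs : split1 rest with
        | nil => exact absurd hs (split1_ne_nil rest)
        | cons a l => simp [List.modifyHead]

theorem splitOn_eq_split1 (cs : List Char) :
    PySem.Chars.splitOn cs ['"'] = split1 cs := by
  rw [PySem.Chars.splitOn, splitOn_go_eq _ _ _ _ (Nat.le_succ _)]
  cases hs : split1 cs with
  | nil => exact absurd hs (split1_ne_nil cs)
  | cons a l => simp [List.modifyHead]

/-- structural single-char replace -/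
def repl1 (a : Char) (new : List Char) : List Char → List Char
  | [] => []
  | c :: t => (if c = a then new else [c]) ++ repl1 a new t

theorem replace_go_eq (a : Char) (new : List Char) :
    ∀ (fuel : Nat) (l acc : List Char), l.length ≤ fuel →
    PySem.Chars.replace.go [a] new fuel l acc = acc.reverse ++ repl1 a new l := by
  intro fuel
  induction fuel with
  | zero =>
    intro l acc h
    have hl : l = [] := List.eq_nil_of_length_eq_zero (Nat.le_zero.mp h)
    subst hl
    simp [PySem.Chars.replace.go, repl1]
  | succ fuel ih =>
    intro l acc h
    cases l with
    | nil => simp [PySem.Chars.replace.go, repl1]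
    | cons c rest =>
      by_cases hc : c = a
      · subst hc
        rw [PySem.Chars.replace.go]
        simp only [List.isPrefixOf, BEq.rfl, Bool.true_and, if_pos]
        simp only [List.length_cons, List.drop_succ_cons, List.length_nil, List.drop_zero]
        rw [ih rest _ (by simpa using h)]
        simp [repl1]
      · rw [PySem.Chars.replace.go]
        have hpre : ([a] : List Char).isPrefixOf (c :: rest) = false := by
          simp [List.isPrefixOf]
          exact fun e => hc e.symm
        rw [hpre]
        simp only [Bool.false_eq_true, if_false]
        rw [ih rest _ (by simpa using h)]
        simp [repl1, hc]

theorem replace_eq_repl1 (a : Char) (new l : List Char) :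
    PySem.Chars.replace l [a] new = repl1 a new l := by
  rw [PySem.Chars.replace]
  simp only [List.isEmpty_cons, Bool.false_eq_true, if_false]
  exact replace_go_eq a new l.length l [] (le_refl _)

def fix (p : List Char) : List Char := repl1 '\r' [] (repl1 '\n' [','] p)

/-- alternating fixer -/
def altmap (q : Bool) : List (List Char) → List (List Char)
  | [] => []
  | x :: xs => (if q then fix x else x) :: altmap (!q) xs

theorem enumerate_map_eq_altmap : ∀ (parts : List (List Char)) (n : Int), 0 ≤ n →
    (PySem.List.enumerate parts n).map (fun ip =>
      if ip.1 % 2 == 1 then fix ip.2 else ip.2) = altmap (n % 2 == 1) parts := by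
  intro parts
  induction parts with
  | nil => intro n hn; simp [PySem.List.enumerate, altmap]
  | cons x xs ih =>
    intro n hn
    rw [PySem.List.enumerate_cons, List.map_cons, ih (n + 1) (by omega)]
    have hflip : ((n + 1) % 2 == 1) = !(n % 2 == 1) := by
      rcases Int.emod_two_eq_zero_or_one n with h | h <;> simp [h] <;> omega
    rw [hflip, altmap]

theorem join_head (sep x : List Char) (xs : List (List Char)) :
    PySem.Chars.join sep (x :: xs) = x ++ PySem.Chars.join sep ([] :: xs) := by
  cases xs with
  | nil => rw [PySem.Chars.join_singleton, PySem.Chars.join_singleton]; simp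
  | cons y t => rw [PySem.Chars.join_cons_cons, PySem.Chars.join_cons_cons]; simp

theorem repl1_append (a : Char) (new xs ys : List Char) :
    repl1 a new (xs ++ ys) = repl1 a new xs ++ repl1 a new ys := by
  induction xs with
  | nil => simp [repl1]
  | cons c t ih => simp [repl1, ih]

theorem fix_cons (c : Char) (h : List Char) :
    fix (c :: h) = (if c = '\n' then [','] else if c = '\r' then [] else [c]) ++ fix h := by
  unfold fix
  have : repl1 '\n' [','] (c :: h) = (if c = '\n' then [','] else [c]) ++ repl1 '\n' [','] h := by
    simp [repl1]
  rw [this, repl1_append]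
  by_cases h1 : c = '\n' <;> simp [h1, repl1]

theorem main_lemma : ∀ (cs : List Char) (q : Bool),
    PySem.Chars.join ['"'] (altmap q (split1 cs)) = fA q cs := by
  intro cs
  induction cs with
  | nil =>
    intro q
    cases q <;> simp [split1, altmap, fix, repl1, fA, PySem.Chars.join_singleton]
  | cons c rest ih =>
    intro q
    by_cases hc : c = '"'
    · subst hc
      rw [show split1 ('"' :: rest) = [] :: split1 rest from by simp [split1], altmap]
      have he : (if q then fix [] else []) = ([] : List Char) := by cases q <;> simp [fix, repl1]
      rw [he]
      cases hs : split1 rest with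
      | nil => exact absurd hs (split1_ne_nil rest)
      | cons a l =>
        rw [altmap, PySem.Chars.join_cons_cons]
        have : PySem.Chars.join ['"'] ((if !q then fix a else a) :: altmap (!!q) l) = fA (!q) rest := by
          have := ih (!q); rwa [hs, altmap] at this
        rw [List.nil_append, List.singleton_append, this, fA]
        cases q <;> simp
    · rw [show split1 (c :: rest) = (split1 rest).modifyHead (c :: ·) from by simp [split1, hc]]
      cases hs : split1 rest with
      | nil => exact absurd hs (split1_ne_nil rest)
      | cons a l =>
        have ihq : PySem.Chars.join ['"'] ((if q then fix a else a) :: altmap (!q) l) = fA q rest := by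
          have := ih q; rwa [hs, altmap] at this
        rw [List.modifyHead, altmap]
        have hhead : (if q then fix (c :: a) else c :: a) =
            (if q && decide (c = '\n') then [','] else if q && decide (c = '\r') then [] else [c]) ++
              (if q then fix a else a) := by
          cases q with
          | false => simp
          | true => simp [fix_cons c a]
        rw [join_head, hhead, List.append_assoc, ← join_head, ihq, fA]
        have hq' : (if c == '"' then !q else q) = q := by simp [hc]
        rw [hq']
        cases q <;> simp

-- ===== VERDICT (by name: the statement is the Claim_ definition above) =====
theorem setCR_spec : Claim_equal_setCR := by
  intro s _
  show setCR s = setCR_alt s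
  unfold setCR setCR_alt
  have hmap : (fun (ip : Int × List Char) =>
      if ip.1 % 2 == 1 then PySem.Chars.replace (PySem.Chars.replace ip.2 ['\n'] [',']) ['\r'] [] else ip.2) =
      (fun (ip : Int × List Char) => if ip.1 % 2 == 1 then fix ip.2 else ip.2) := by
    funext ip; simp only [replace_eq_repl1, fix]
  simp only [splitOn_eq_split1, hmap]
  rw [enumerate_map_eq_altmap _ 0 (le_refl 0)]
  have h0 : ((0 : Int) % 2 == 1) = false := by decide
  rw [h0, main_lemma]
  have hA := fA_foldl s.toList [] false
  simp only [List.nil_append] at hA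
  rw [hA]
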